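-- pv_equiv track=rewrite | github.com/XavierC4Q/python_playground | codewars/shortenYourSpeech.py | shorten_your_speech
-- ===== SOURCE A (Python) =====
-- def shorten_your_speech(strs):
--     '''
--     :strs A string of words
--     :If word has more than four letters only include four letters + a .
--     or if the 4th letter is a vowel, a dot. Words shorter than 4 are not
--     affected.
--     '''
--     words = strs.split()
--     result = []
--     vowels = 'aeiou'
--
--     for w in words:
--         if len(w) < 4:
--             result.append(w)
--         else:
--             rest = w[3:]
--             pushed = False
--             for l in range(len(rest)):
--                 if rest[l] in vowels:
--                     result.append(w[:3 + l] + '.')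
--                     pushed = True
--                     break
--             if not pushed:
--                 result.append(w)
--     return ' '.join(result)
-- ===== SOURCE B (Python) =====
-- def shorten_your_speech(strs):
--     # Single left-to-right pass over the characters (no split/join, no per-word
--     # re-scan): a small state machine tracks the position inside the current
--     # word and, once a vowel is seen at index >= 3, emits '.' and skips the
--     # rest of the word.
--     out = []
--     i = 0          # index inside current word; -1 = skipping rest of word
--     at_word = False
--     for ch in strs:
--         if ch.isspace():
--             at_word = False
--         else:
--             if not at_word:
--                 if out:
--                     out.append(' ')
--                 at_word = True
--                 i = 0
--             if i >= 0:
--                 if i >= 3 and ch in 'aeiou':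
--                     out.append('.')
--                     i = -1
--                 else:
--                     out.append(ch)
--                     i += 1
--     return ''.join(out)
-- ===== Notes on version B (the rewrite author's own statement) =====
-- stated objective: alternative
-- what changed: A splits the string into words, rescans each long word's tail with an index loop for the first vowel past position 3 and joins the processed words; B makes a single left-to-right state-machine pass over the characters, tracking the position inside the current word and emitting a dot then skipping the rest of the word once a vowel is seen at index at least 3, with no split/join and no per-word rescan.
import Mathlib
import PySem

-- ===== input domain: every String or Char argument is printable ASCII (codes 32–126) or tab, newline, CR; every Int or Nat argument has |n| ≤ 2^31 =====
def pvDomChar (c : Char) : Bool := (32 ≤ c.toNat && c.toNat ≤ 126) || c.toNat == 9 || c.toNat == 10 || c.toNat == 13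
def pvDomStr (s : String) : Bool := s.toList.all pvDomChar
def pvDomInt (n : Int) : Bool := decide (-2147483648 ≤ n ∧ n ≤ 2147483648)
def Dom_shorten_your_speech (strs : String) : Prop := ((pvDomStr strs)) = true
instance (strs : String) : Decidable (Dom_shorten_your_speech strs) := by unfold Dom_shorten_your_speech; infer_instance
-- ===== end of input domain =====

-- B replaces A's split / per-word index scan / join with a single left-to-right
-- state-machine pass over the characters (objective: alternative algorithm).

-- ===== PORT A =====
def pvVowels : List Char := ['a', 'e', 'i', 'o', 'u']

-- A's inner loop 'for l in range(len(rest)): if rest[l] in vowels: … break'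
-- as structural recursion over rest carrying the index l
def pvFindVowel : List Char → Int → Option Int
  | [], _ => none
  | c :: cs, l => if c ∈ pvVowels then some l else pvFindVowel cs (l + 1)

def pvWordA (w : List Char) : List Char :=
  if w.length < 4 then w
  else
    let rest := PySem.Chars.slice w (some 3) none
    match pvFindVowel rest 0 with
    | some l => PySem.Chars.slice w none (some (3 + l)) ++ ['.']
    | none => w

def shorten_your_speech (strs : String) : String :=
  let words := PySem.Chars.split₀ strs.toList
  let result := words.foldl (fun res w => res ++ [pvWordA w]) []
  String.ofList (PySem.Chars.join [' '] result)

-- ===== PORT B =====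
-- state: (out, i, at_word); i = -1 means 'skipping the rest of the word'
def pvStep (st : List Char × Int × Bool) (ch : Char) : List Char × Int × Bool :=
  if PySem.Chars.isspace ch then (st.1, st.2.1, false)
  else
    let out := if st.2.2 then st.1 else (if st.1.isEmpty then st.1 else st.1 ++ [' '])
    let i : Int := if st.2.2 then st.2.1 else 0
    if 0 ≤ i then
      if 3 ≤ i ∧ ch ∈ pvVowels then (out ++ ['.'], -1, true)
      else (out ++ [ch], i + 1, true)
    else (out, i, true)

def shorten_your_speech_alt (strs : String) : String :=
  String.ofList (strs.toList.foldl pvStep ([], 0, false)).1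

-- ===== PRECONDITION & SPEC =====
def Spec_shorten_your_speech (strs : String) (out : String) : Prop := out = shorten_your_speech_alt strs
instance (strs : String) (out : String) : Decidable (Spec_shorten_your_speech strs out) := by unfold Spec_shorten_your_speech; infer_instance

-- ===== CLAIM (what is proved, stated in full; the proofs are below) =====
def Claim_equal_shorten_your_speech : Prop := ∀ (strs : String), Dom_shorten_your_speech strs → Spec_shorten_your_speech strs (shorten_your_speech strs)

-- ===== LEMMAS AND PROOFS =====

lemma pvFindVowel_nonneg (w : List Char) (l0 l : Int) (h0 : 0 ≤ l0)
    (h : pvFindVowel w l0 = some l) : 0 ≤ l := by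
  induction w generalizing l0 with
  | nil => simp [pvFindVowel] at h
  | cons c t ih =>
    simp only [pvFindVowel] at h
    split_ifs at h with hc
    · injection h with h; omega
    · exact ih (l0 + 1) (by omega) h

lemma pvFindVowel_shift (t : List Char) (s : Int) :
    pvFindVowel t s = (pvFindVowel t 0).map (· + s) := by
  induction t generalizing s with
  | nil => simp [pvFindVowel]
  | cons d u ih =>
    by_cases hd : d ∈ pvVowels
    · simp [pvFindVowel, hd]
    · simp only [pvFindVowel, if_neg hd]
      rw [ih (s + 1), ih (0 + 1)]
      cases h : pvFindVowel u 0 <;> simp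
      omega

def pvWstep (st : List Char × Int) (ch : Char) : List Char × Int :=
  if 0 ≤ st.2 then
    if 3 ≤ st.2 ∧ ch ∈ pvVowels then (st.1 ++ ['.'], -1)
    else (st.1 ++ [ch], st.2 + 1)
  else st

lemma pvWstep_append (p e : List Char) (i : Int) (ch : Char) :
    pvWstep (p ++ e, i) ch = (p ++ (pvWstep (e, i) ch).1, (pvWstep (e, i) ch).2) := by
  simp only [pvWstep]
  split_ifs <;> simp

lemma pvWfold_neg (l : List Char) (e : List Char) (i : Int) (h : i < 0) :
    l.foldl pvWstep (e, i) = (e, i) := by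
  induction l with
  | nil => rfl
  | cons c t ih =>
    simp only [List.foldl_cons, pvWstep]
    rw [if_neg (by omega)]
    exact ih

lemma pvWfold_high (w : List Char) (e : List Char) (n : Int) (hn : 3 ≤ n) :
    w.foldl pvWstep (e, n) =
      match pvFindVowel w 0 with
      | some l => (e ++ w.take l.toNat ++ ['.'], -1)
      | none => (e ++ w, n + w.length) := by
  induction w generalizing e n with
  | nil => simp [pvFindVowel]
  | cons c t ih =>
    have h0 : (0 : Int) ≤ n := by omega
    by_cases hc : c ∈ pvVowels
    · have h2 : 3 ≤ n ∧ c ∈ pvVowels := ⟨hn, hc⟩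
      simp only [List.foldl_cons, pvWstep]
      rw [if_pos h0, if_pos h2, pvWfold_neg t _ _ (by omega)]
      simp [pvFindVowel, hc]
    · have h2 : ¬(3 ≤ n ∧ c ∈ pvVowels) := fun h => hc h.2
      simp only [List.foldl_cons, pvWstep]
      rw [if_pos h0, if_neg h2, ih _ (n + 1) (by omega)]
      simp only [pvFindVowel, if_neg hc]
      rw [pvFindVowel_shift t (0 + 1)]
      cases h : pvFindVowel t 0 with
      | none => simp; ring
      | some l =>
        have hl : 0 ≤ l := pvFindVowel_nonneg t 0 l le_rfl h
        simp only [Option.map_some]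
        have hto : (l + (0 + 1)).toNat = l.toNat + 1 := by omega
        simp only [hto, List.take_succ_cons]
        simp

lemma pvWstream_eq_wordA (w : List Char) : (w.foldl pvWstep ([], 0)).1 = pvWordA w := by
  match w with
  | [] => simp [pvWordA]
  | [a] => norm_num [pvWordA, List.foldl, pvWstep]
  | [a, b] => norm_num [pvWordA, List.foldl, pvWstep]
  | a :: b :: c :: rest =>
    have h3 : List.foldl pvWstep ([], 0) (a :: b :: c :: rest)
        = List.foldl pvWstep ([a, b, c], 3) rest := by
      norm_num [List.foldl, pvWstep]
    rw [h3, pvWfold_high rest [a, b, c] 3 le_rfl]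
    cases rest with
    | nil => simp [pvWordA, pvFindVowel]
    | cons d u =>
      have hlen : ¬ (a :: b :: c :: d :: u).length < 4 := by simp
      have hdrop : PySem.Chars.slice (a :: b :: c :: d :: u) (some 3) none = d :: u := by
        simp [PySem.List.slice_from (a :: b :: c :: d :: u) (by norm_num : (0:Int) ≤ 3)]
      simp only [pvWordA, if_neg hlen, hdrop]
      cases h : pvFindVowel (d :: u) 0 with
      | none => simp
      | some l =>
        have hl : 0 ≤ l := pvFindVowel_nonneg _ 0 l le_rfl h
        have htake : PySem.List.slice (a :: b :: c :: d :: u) none (some (3 + l))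
            = a :: b :: c :: List.take l.toNat (d :: u) := by
          rw [PySem.List.slice_to (a :: b :: c :: d :: u) (by omega : (0:Int) ≤ 3 + l)]
          have : (3 + l).toNat = l.toNat + 3 := by omega
          simp [this, List.take_succ_cons]
        simp [PySem.Chars.slice_eq_listSlice, htake]

def pvJ (A : List (List Char)) : List Char := PySem.Chars.join [' '] (A.map pvWordA)

def pvE (A : List (List Char)) (u : List Char) : List Char :=
  if u.isEmpty then pvJ A
  else (if A.isEmpty then [] else pvJ A ++ [' ']) ++ (u.foldl pvWstep ([], 0)).1

lemma pvJoin_append (sep : List Char) (xs : List (List Char)) (y : List Char) :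
    PySem.Chars.join sep (xs ++ [y]) =
      if xs.isEmpty then y else PySem.Chars.join sep xs ++ sep ++ y := by
  induction xs with
  | nil => simp [PySem.Chars.join_singleton]
  | cons a t ih =>
    cases t with
    | nil => simp [PySem.Chars.join_cons_cons, PySem.Chars.join_singleton]
    | cons b u =>
      have ih' : PySem.Chars.join sep ((b :: u) ++ [y]) = PySem.Chars.join sep (b :: u) ++ sep ++ y := by
        rw [ih]; simp
      calc PySem.Chars.join sep ((a :: b :: u) ++ [y])
          = a ++ sep ++ PySem.Chars.join sep ((b :: u) ++ [y]) := by
            rw [List.cons_append, List.cons_append, PySem.Chars.join_cons_cons]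
        _ = a ++ sep ++ (PySem.Chars.join sep (b :: u) ++ sep ++ y) := by rw [ih']
        _ = if (a :: b :: u).isEmpty then y else PySem.Chars.join sep (a :: b :: u) ++ sep ++ y := by
            simp [PySem.Chars.join_cons_cons]

lemma pvJ_append (A : List (List Char)) (u : List Char) :
    pvJ (A ++ [u]) = (if A.isEmpty then [] else pvJ A ++ [' ']) ++ pvWordA u := by
  simp only [pvJ, List.map_append, List.map_cons, List.map_nil, pvJoin_append]
  cases A <;> simp

lemma pvWordA_ne_nil (w : List Char) (h : w ≠ []) : pvWordA w ≠ [] := by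
  unfold pvWordA
  split_ifs
  · exact h
  · simp only [PySem.Chars.slice_eq_listSlice]
    cases pvFindVowel (PySem.List.slice w (some 3) none) 0 with
    | none => simp [h]
    | some l => simp

lemma pvJ_isEmpty (A : List (List Char)) (hA : ∀ w ∈ A, w ≠ []) :
    (pvJ A).isEmpty = A.isEmpty := by
  cases A with
  | nil => simp [pvJ, PySem.Chars.join_nil]
  | cons a t =>
    have ha : pvWordA a ≠ [] := pvWordA_ne_nil a (hA a (by simp))
    cases t with
    | nil => simp [pvJ, PySem.Chars.join_singleton, ha]
    | cons b u => simp [pvJ, PySem.Chars.join_cons_cons, ha]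

lemma pvStep_word (o : List Char) (i : Int) (c : Char) (h : PySem.Chars.isspace c = false) :
    pvStep (o, i, true) c = ((pvWstep (o, i) c).1, (pvWstep (o, i) c).2, true) := by
  simp only [pvStep, pvWstep, h]
  split_ifs <;> simp_all

lemma pv_main (cs : List Char) : ∀ (A : List (List Char)) (u : List Char) (j : Int),
    (∀ w ∈ A, w ≠ []) →
    (u ≠ [] → j = (u.foldl pvWstep ([], 0)).2) →
    (cs.foldl pvStep (pvE A u, j, !u.isEmpty)).1
      = pvJ (PySem.Chars.split₀.go cs u.reverse A.reverse) := by
  induction cs with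
  | nil =>
    intro A u j hA hj
    cases u with
    | nil => simp [pvE, PySem.Chars.split₀.go]
    | cons x v =>
      simp only [PySem.Chars.split₀.go]
      rw [if_neg (by simp)]
      have : ((x :: v).reverse.reverse :: A.reverse).reverse = A ++ [x :: v] := by simp
      rw [this]
      simp only [List.foldl_nil, pvE, List.isEmpty_cons, Bool.false_eq_true, if_false,
        pvWstream_eq_wordA, pvJ_append]
  | cons c t ih =>
    intro A u j hA hj
    simp only [List.foldl_cons]
    by_cases hsp : PySem.Chars.isspace c
    · have hstep : pvStep (pvE A u, j, !u.isEmpty) c = (pvE A u, j, false) := by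
        simp [pvStep, hsp]
      rw [hstep]
      simp only [PySem.Chars.split₀.go, hsp, if_true]
      cases u with
      | nil =>
        rw [if_pos (by simp)]
        have := ih A [] j hA (by simp)
        simpa using this
      | cons x v =>
        rw [if_neg (by simp)]
        have hE : pvE A (x :: v) = pvE (A ++ [x :: v]) [] := by
          simp only [pvE, List.isEmpty_cons, List.isEmpty_nil, if_true, Bool.false_eq_true,
            if_false]
          rw [pvJ_append, pvWstream_eq_wordA]
        have hrearr : (x :: v).reverse.reverse :: A.reverse = (A ++ [x :: v]).reverse := by simp
        rw [hE, hrearr]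
        have := ih (A ++ [x :: v]) [] j
          (by intro w hw; rcases List.mem_append.1 hw with h | h
              · exact hA w h
              · simp at h; simp [h])
          (by simp)
        simpa using this
    · have hspf : PySem.Chars.isspace c = false := by simpa using hsp
      simp only [PySem.Chars.split₀.go, hspf, Bool.false_eq_true, if_false]
      cases u with
      | nil =>
        have hstep : pvStep (pvE A [], j, !(List.isEmpty ([] : List Char))) c = (pvE A [c], 1, true) := by
          simp only [pvE, List.isEmpty_nil, if_true, List.isEmpty_cons]
          simp only [pvStep, hspf, Bool.false_eq_true, if_false, Bool.not_true]
          rw [pvJ_isEmpty A hA]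
          have hfold : ([c].foldl pvWstep ([], 0)).1 = [c] := by norm_num [List.foldl, pvWstep]
          norm_num [hfold]
          cases A with
          | nil => norm_num [pvJ, PySem.Chars.join_nil, pvWstep]
          | cons a t =>
            norm_num [pvWstep]
            simp
        rw [hstep]
        have h1 : (1 : Int) = ([c].foldl pvWstep ([], 0)).2 := by norm_num [List.foldl, pvWstep]
        have := ih A [c] 1 hA (fun _ => h1)
        simpa using this
      | cons x v =>
        have hj' := hj (by simp)
        have hstep : pvStep (pvE A (x :: v), j, !(x :: v).isEmpty) c
            = (pvE A ((x :: v) ++ [c]), (((x :: v) ++ [c]).foldl pvWstep ([], 0)).2, true) := by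
          simp only [List.isEmpty_cons, Bool.not_false]
          rw [hj', pvStep_word _ _ _ hspf]
          simp only [pvE, List.isEmpty_cons, Bool.false_eq_true, if_false]
          rw [pvWstep_append]
          have hfoldapp : ((x :: v) ++ [c]).foldl pvWstep ([], 0)
              = pvWstep ((x :: v).foldl pvWstep ([], 0)) c := by
            rw [List.foldl_append]; rfl
          rw [hfoldapp]
          simp
        rw [hstep]
        have hrev : c :: (x :: v).reverse = ((x :: v) ++ [c]).reverse := by simp
        rw [hrev]
        exact ih A ((x :: v) ++ [c]) _ hA (fun _ => rfl)

-- ===== VERDICT (by name: the statement is the Claim_ definition above) =====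
theorem shorten_your_speech_spec : Claim_equal_shorten_your_speech := by
  intro strs _
  unfold Spec_shorten_your_speech
  have hmain := pv_main strs.toList [] [] 0 (by simp) (by simp)
  simp only [pvE, pvJ, List.isEmpty_nil, if_true, List.map_nil, List.foldl_nil,
    PySem.Chars.join_nil, List.reverse_nil, Bool.not_true] at hmain
  simp only [shorten_your_speech, shorten_your_speech_alt]
  rw [PySem.List.foldl_append_singleton_eq_map, hmain]
  rfl
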